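-- pv_equiv track=rewrite | github.com/johnjcousens/aws-elasticdrs-orchestrator | lambda/tag_discovery.py | group_servers_by_wave
-- ===== SOURCE A (Python) =====
-- from typing import Dict, Any, List, Optional
--
-- def group_servers_by_wave(servers: List[Dict]) -> Dict[str, List[Dict]]:
--     """
--     Group servers by their DR-Wave tag.
--     Servers without DR-Wave tag go to wave "1" by default.
--     """
--     servers_by_wave = {}
--
--     for server in servers:
--         wave = server.get('tags', {}).get('DR-Wave', '1')
--         if wave not in servers_by_wave:
--             servers_by_wave[wave] = []
--         servers_by_wave[wave].append(server)
--
--     # Sort waves numerically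
--     sorted_waves = {}
--     for wave in sorted(servers_by_wave.keys(), key=lambda x: int(x) if x.isdigit() else 999):
--         sorted_waves[wave] = servers_by_wave[wave]
--
--     return sorted_waves
-- ===== SOURCE B (Python) =====
-- from typing import Dict, List
--
--
-- def group_servers_by_wave(servers: List[Dict]) -> Dict[str, List[Dict]]:
--     """
--     Group servers by their DR-Wave tag (servers without the tag go to wave "1"),
--     waves ordered numerically.
--
--     Decorate each server with its wave once, stably sort the decorated list by
--     the numeric wave key, then build the grouped dict in a single pass: groups
--     appear already in numeric order, and sort stability preserves the original
--     order of servers within a wave and first-appearance order among tied keys.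
--     """
--     decorated = [(server.get('tags', {}).get('DR-Wave', '1'), server)
--                  for server in servers]
--     decorated.sort(key=lambda pair: int(pair[0]) if pair[0].isdigit() else 999)
--
--     result = {}
--     for wave, server in decorated:
--         result[wave] = result.get(wave, []) + [server]
--     return result
-- ===== Notes on version B (the rewrite author's own statement) =====
-- stated objective: alternative
-- what changed: Instead of bucketing servers into a dict and then sorting the distinct wave keys and rebuilding a second dict, B decorates each server with its wave, stably sorts the whole decorated list by the numeric wave key, and builds the grouped dict in one grouping pass over the sorted list, relying on sort stability for within-wave order and tie order.
import Mathlib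
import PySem

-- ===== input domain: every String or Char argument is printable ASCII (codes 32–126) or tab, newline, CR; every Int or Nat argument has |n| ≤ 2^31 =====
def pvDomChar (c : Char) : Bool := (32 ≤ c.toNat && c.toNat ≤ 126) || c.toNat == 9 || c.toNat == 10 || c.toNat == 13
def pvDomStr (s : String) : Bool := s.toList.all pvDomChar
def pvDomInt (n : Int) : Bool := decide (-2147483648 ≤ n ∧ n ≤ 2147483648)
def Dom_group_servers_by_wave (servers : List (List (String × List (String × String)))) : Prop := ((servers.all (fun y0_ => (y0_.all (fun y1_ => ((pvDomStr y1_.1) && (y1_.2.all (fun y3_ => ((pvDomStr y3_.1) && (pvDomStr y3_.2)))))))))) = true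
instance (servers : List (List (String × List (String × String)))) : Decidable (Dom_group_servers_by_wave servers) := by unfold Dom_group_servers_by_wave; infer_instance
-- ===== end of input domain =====

-- B groups by stably sorting the wave-decorated server list once and doing a single grouping
-- pass, instead of A's bucket-dict + sort-the-keys + rebuild; same return value, similar cost.

-- shared tag extraction and numeric sort key (both Pythons compute these identically)
-- wave = server.get('tags', {}).get('DR-Wave', '1')
def pvWave (server : List (String × List (String × String))) : String :=
  (PySem.Dict.mk ((PySem.Dict.mk server).getD "tags" [])).getD "DR-Wave" "1"

-- int(x) if x.isdigit() else 999
def pvKey (x : String) : Int :=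
  if PySem.Str.strIsdigit x then (PySem.Int.ofStr? x).getD 999 else 999

-- ===== PORT A =====
def group_servers_by_wave (servers : List (List (String × List (String × String)))) :
    List (String × List (List (String × List (String × String)))) :=
  -- servers_by_wave = {}; for server in servers: … append …
  let servers_by_wave :=
    servers.foldl
      (fun d server =>
        let wave := pvWave server
        let d := if d.contains wave then d else d.insert wave []
        d.modify wave [] (fun l => l ++ [server]))
      PySem.Dict.empty
  -- sorted_waves = {}; for wave in sorted(keys, key=…): sorted_waves[wave] = servers_by_wave[wave]
  let sorted_waves :=
    (PySem.List.sorted servers_by_wave.keys pvKey).foldl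
      (fun out wave => out.insert wave (servers_by_wave.getD wave []))
      PySem.Dict.empty
  sorted_waves.items

-- ===== PORT B =====
def group_servers_by_wave_alt (servers : List (List (String × List (String × String)))) :
    List (String × List (List (String × List (String × String)))) :=
  -- decorated = [(wave_of(s), s) for s in servers]; decorated.sort(key=…)  (stable)
  let decorated := servers.map (fun server => (pvWave server, server))
  let decorated := PySem.List.sorted decorated (fun pair => pvKey pair.1)
  -- result = {}; for wave, server in decorated: result[wave] = result.get(wave, []) + [server]
  let result :=
    decorated.foldl
      (fun d p => d.modify p.1 [] (fun l => l ++ [p.2]))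
      PySem.Dict.empty
  result.items

-- ===== PRECONDITION & SPEC =====
def Spec_group_servers_by_wave (servers : List (List (String × List (String × String)))) (out : List (String × List (List (String × List (String × String))))) : Prop := out = group_servers_by_wave_alt servers
instance (servers : List (List (String × List (String × String)))) (out : List (String × List (List (String × List (String × String))))) : Decidable (Spec_group_servers_by_wave servers out) := by
  unfold Spec_group_servers_by_wave
  letI : DecidableEq (String × String) := inferInstance
  letI : DecidableEq (List (String × String)) := inferInstance
  letI : DecidableEq (String × List (String × String)) := inferInstance
  letI : DecidableEq (List (String × List (String × String))) := inferInstance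
  letI : DecidableEq (List (List (String × List (String × String)))) := inferInstance
  letI : DecidableEq (String × List (List (String × List (String × String)))) := inferInstance
  exact instDecidableEqList out _

-- ===== CLAIM (what is proved, stated in full; the proofs are below) =====
def Claim_equal_group_servers_by_wave : Prop := ∀ (servers : List (List (String × List (String × String)))), Dom_group_servers_by_wave servers → Spec_group_servers_by_wave servers (group_servers_by_wave servers)

-- ===== LEMMAS AND PROOFS =====

-- ---- generic facts about PySem.List.insertBy (the step of the stable insertion sort) ----

/-- `insertBy` splits its input: a prefix it skips (keys ≤ key x), `x`, and the rest,
whose head (if any) has key > key x. -/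
theorem pv_insertBy_split {α : Type} (key : α → Int) (x : α) (s : List α) :
    ∃ P Q, PySem.List.insertBy (fun a b => decide (key a < key b)) x s = P ++ x :: Q ∧
      s = P ++ Q ∧ (∀ y ∈ P, ¬ key x < key y) ∧ (∀ q, Q.head? = some q → key x < key q) := by
  induction s with
  | nil =>
      exact ⟨[], [], by simp [PySem.List.insertBy], rfl, by simp, by simp⟩
  | cons y ys ih =>
      by_cases h : key x < key y
      · refine ⟨[], y :: ys, ?_, rfl, by simp, ?_⟩
        · rw [PySem.List.insertBy]; simp [h]
        · intro q hq
          simp only [List.head?_cons, Option.some.injEq] at hq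
          exact hq ▸ h
      · obtain ⟨P, Q, h1, h2, h3, h4⟩ := ih
        refine ⟨y :: P, Q, ?_, by simp [h2], ?_, h4⟩
        · rw [PySem.List.insertBy]; simp [h, h1]
        · intro z hz
          rcases List.mem_cons.mp hz with rfl | hz
          · exact h
          · exact h3 z hz

/-- In a key-sorted list split as `P ++ Q` with `key x < key (head Q)`, every element of `Q`
has key > key x. -/
theorem pv_suffix_gt {α : Type} (key : α → Int) (x : α) {P Q : List α}
    (hpw : (P ++ Q).Pairwise (fun a b => key a ≤ key b))
    (hhead : ∀ q, Q.head? = some q → key x < key q) :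
    ∀ q ∈ Q, key x < key q := by
  cases Q with
  | nil => intro q hq; simp at hq
  | cons q0 Q =>
      have hq0 : key x < key q0 := hhead q0 rfl
      have hQ : (q0 :: Q).Pairwise (fun a b => key a ≤ key b) :=
        (List.pairwise_append.mp hpw).2.1
      intro q hq
      rcases List.mem_cons.mp hq with rfl | hq
      · exact hq0
      · have := (List.pairwise_cons.mp hQ).1 q hq
        omega

/-- Stability, filter form: inserting `x` (whose key is the common key of the class `p`)
into a key-sorted list puts it after every other element of the class. -/
theorem pv_filter_insertBy_pos {α : Type} (key : α → Int) (p : α → Bool) (x : α) (s : List α)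
    (hx : p x = true) (hclass : ∀ z, p z = true → key z = key x)
    (hpw : s.Pairwise (fun a b => key a ≤ key b)) :
    (PySem.List.insertBy (fun a b => decide (key a < key b)) x s).filter p = s.filter p ++ [x] := by
  obtain ⟨P, Q, h1, h2, h3, h4⟩ := pv_insertBy_split key x s
  subst h2
  have hQ : ∀ q ∈ Q, key x < key q := pv_suffix_gt key x hpw h4
  have hQnil : Q.filter p = [] := by
    refine List.filter_eq_nil_iff.mpr ?_
    intro q hq hpq
    have := hclass q hpq
    have := hQ q hq
    omega
  rw [h1]
  simp [List.filter_append, hx, hQnil]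

/-- Inserting an element not in the class `p` does not change the `p`-filter. -/
theorem pv_filter_insertBy_neg {α : Type} (key : α → Int) (p : α → Bool) (x : α) (s : List α)
    (hx : p x = false) :
    (PySem.List.insertBy (fun a b => decide (key a < key b)) x s).filter p = s.filter p := by
  obtain ⟨P, Q, h1, h2, _, _⟩ := pv_insertBy_split key x s
  subst h2
  rw [h1]
  simp [List.filter_append, hx]

/-- The stable sort does not change the order of any single key class. -/
theorem pv_sorted_filter_of_class {α : Type} (key : α → Int) (p : α → Bool) (c0 : Int)
    (hclass : ∀ z, p z = true → key z = c0) (l : List α) :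
    (PySem.List.sorted l key).filter p = l.filter p := by
  induction l using List.reverseRecOn with
  | nil => simp [PySem.List.sorted]
  | append_singleton l x ih =>
      rw [PySem.List.sorted_eq_foldl_insertBy, List.foldl_append, ← PySem.List.sorted_eq_foldl_insertBy]
      simp only [List.foldl_cons, List.foldl_nil]
      by_cases hx : p x = true
      · rw [pv_filter_insertBy_pos key p x _ hx
            (fun z hz => by rw [hclass z hz, hclass x hx]) (PySem.List.sorted_pairwise l key)]
        rw [ih]
        simp [List.filter_append, hx]
      · rw [pv_filter_insertBy_neg key p x _ (by simpa using hx), ih]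
        simp [List.filter_append, hx]

-- ---- dedup (= PySem.Set.ofList) vs the stable sort ----

theorem pv_add_of_mem {α : Type} [BEq α] [LawfulBEq α] {s : List α} {a : α} (h : a ∈ s) :
    PySem.Set.add s a = s := by
  simp [PySem.Set.add, PySem.Set.contains_eq_listContains]
  exact h

theorem pv_add_of_not_mem {α : Type} [BEq α] [LawfulBEq α] {s : List α} {a : α} (h : ¬ a ∈ s) :
    PySem.Set.add s a = s ++ [a] := by
  simp [PySem.Set.add, PySem.Set.contains_eq_listContains]
  exact h

/-- Folding `Set.add` over `Q` from two accumulators that differ by one extra element `x`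
(not occurring in `Q`) appends the same new elements `Δ` to both. -/
theorem pv_foldl_add_delta {α : Type} [BEq α] [LawfulBEq α] (x : α) :
    ∀ (Q : List α), (∀ q ∈ Q, q ≠ x) → ∀ (S1 S2 : List α),
      ∃ Δ, List.foldl PySem.Set.add (S1 ++ S2) Q = (S1 ++ S2) ++ Δ ∧
        List.foldl PySem.Set.add (S1 ++ x :: S2) Q = (S1 ++ x :: S2) ++ Δ ∧
        ∀ a ∈ Δ, a ∈ Q := by
  intro Q
  induction Q with
  | nil => intro _ S1 S2; exact ⟨[], by simp, by simp, by simp⟩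
  | cons q Q ih =>
      intro hQ S1 S2
      have hqx : q ≠ x := hQ q (List.mem_cons_self ..)
      have hmem : q ∈ S1 ++ x :: S2 ↔ q ∈ S1 ++ S2 := by
        simp [List.mem_append, List.mem_cons, hqx]
      by_cases hq : q ∈ S1 ++ S2
      · obtain ⟨Δ, h1, h2, h3⟩ := ih (fun a ha => hQ a (List.mem_cons_of_mem _ ha)) S1 S2
        refine ⟨Δ, ?_, ?_, fun a ha => List.mem_cons_of_mem _ (h3 a ha)⟩
        · simpa [pv_add_of_mem hq] using h1
        · simpa [pv_add_of_mem (hmem.mpr hq)] using h2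
      · obtain ⟨Δ, h1, h2, h3⟩ := ih (fun a ha => hQ a (List.mem_cons_of_mem _ ha)) S1 (S2 ++ [q])
        refine ⟨q :: Δ, ?_, ?_, ?_⟩
        · rw [List.foldl_cons, pv_add_of_not_mem hq]
          rw [List.append_assoc] at h1 ⊢
          simpa [List.append_assoc] using h1
        · rw [List.foldl_cons, pv_add_of_not_mem (fun h => hq (hmem.mp h))]
          have : (S1 ++ x :: S2) ++ [q] = S1 ++ x :: (S2 ++ [q]) := by simp
          rw [this]
          simpa [List.append_assoc] using h2
        · intro a ha
          rcases List.mem_cons.mp ha with rfl | ha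
          · exact List.mem_cons_self ..
          · exact List.mem_cons_of_mem _ (h3 a ha)

theorem pv_ofList_append {α : Type} [BEq α] (l1 l2 : List α) :
    PySem.Set.ofList (l1 ++ l2) = List.foldl PySem.Set.add (PySem.Set.ofList l1) l2 := by
  rw [PySem.Set.ofList_eq_foldl, PySem.Set.ofList_eq_foldl, List.foldl_append]

/-- `insertBy` into a list `A ++ B` where all of `A` is skipped and the head of `B` (if any)
triggers insertion. -/
theorem pv_insertBy_append {α : Type} (key : α → Int) (x : α) :
    ∀ (A B : List α), (∀ y ∈ A, ¬ key x < key y) → (∀ q, B.head? = some q → key x < key q) →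
      PySem.List.insertBy (fun a b => decide (key a < key b)) x (A ++ B) = A ++ x :: B := by
  intro A
  induction A with
  | nil =>
      intro B _ hB
      cases B with
      | nil => simp [PySem.List.insertBy]
      | cons b t => rw [List.nil_append, PySem.List.insertBy]; simp [hB b rfl]
  | cons a A ih =>
      intro B hA hB
      rw [List.cons_append, PySem.List.insertBy]
      simp only [hA a (List.mem_cons_self ..), decide_eq_true_eq]
      rw [ih B (fun y hy => hA y (List.mem_cons_of_mem _ hy)) hB]
      simp

/-- Dedup commutes with the stable sort: first occurrences of the sorted list appear in the
order in which the stable sort puts the first occurrences of the original. -/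
theorem pv_dedup_sorted {α : Type} [BEq α] [LawfulBEq α] (key : α → Int) (l : List α) :
    PySem.List.dedup (PySem.List.sorted l key) = PySem.List.sorted (PySem.List.dedup l) key := by
  induction l using List.reverseRecOn with
  | nil => simp [PySem.List.sorted, PySem.List.dedup, PySem.Set.ofList_eq_foldl]
  | append_singleton l x ih =>
      have hsx : PySem.List.sorted (l ++ [x]) key =
          PySem.List.insertBy (fun a b => decide (key a < key b)) x (PySem.List.sorted l key) := by
        rw [PySem.List.sorted_eq_foldl_insertBy, List.foldl_append, ← PySem.List.sorted_eq_foldl_insertBy]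
        simp
      obtain ⟨P, Q, h1, h2, h3, h4⟩ := pv_insertBy_split key x (PySem.List.sorted l key)
      have hpw : (P ++ Q).Pairwise (fun a b => key a ≤ key b) := by
        rw [← h2]; exact PySem.List.sorted_pairwise l key
      have hQgt : ∀ q ∈ Q, key x < key q := pv_suffix_gt key x hpw h4
      have hDl : PySem.List.dedup (l ++ [x]) = PySem.Set.add (PySem.List.dedup l) x := by
        simp [PySem.List.dedup_eq_ofList, pv_ofList_append]
      by_cases hx : x ∈ l
      · -- x already occurs: it occurs in P, so dedup of the insertion is dedup of P ++ Q
        have hxs : x ∈ PySem.List.sorted l key := (PySem.List.mem_sorted l key false x).mpr hx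
        have hxP : x ∈ P := by
          rw [h2] at hxs
          rcases List.mem_append.mp hxs with h | h
          · exact h
          · exact absurd (hQgt x h) (by omega)
        have hxSP : x ∈ PySem.Set.ofList P := (PySem.Set.mem_ofList P x).mpr hxP
        rw [hsx, h1, PySem.List.dedup_eq_ofList]
        have : PySem.Set.ofList (P ++ x :: Q) = PySem.Set.ofList (P ++ Q) := by
          rw [pv_ofList_append, pv_ofList_append, List.foldl_cons, pv_add_of_mem hxSP]
        rw [this, ← PySem.List.dedup_eq_ofList, ← h2, ih, hDl,
          pv_add_of_mem (by simpa [PySem.List.dedup_eq_ofList, PySem.Set.mem_ofList] using hx)]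
      · -- x is new: it is inserted into the dedup at the same stable position
        have hxs : ¬ x ∈ PySem.List.sorted l key := fun h =>
          hx ((PySem.List.mem_sorted l key false x).mp h)
        have hxP : ¬ x ∈ P := fun h => hxs (h2 ▸ List.mem_append.mpr (Or.inl h))
        have hxQ : ∀ q ∈ Q, q ≠ x := by
          intro q hq rfl
          exact hxs (h2 ▸ List.mem_append.mpr (Or.inr hq))
        obtain ⟨Δ, hd1, hd2, hd3⟩ := pv_foldl_add_delta x Q hxQ (PySem.Set.ofList P) []
        rw [hsx, h1, PySem.List.dedup_eq_ofList, pv_ofList_append, List.foldl_cons,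
          pv_add_of_not_mem (by simpa [PySem.Set.mem_ofList] using hxP)]
        rw [show PySem.Set.ofList P ++ [x] = PySem.Set.ofList P ++ x :: ([] : List α) by simp]
        rw [hd2]
        -- right-hand side
        rw [hDl, pv_add_of_not_mem (by simpa [PySem.List.dedup_eq_ofList, PySem.Set.mem_ofList] using hx)]
        have hsd : PySem.List.sorted (PySem.List.dedup l ++ [x]) key =
            PySem.List.insertBy (fun a b => decide (key a < key b)) x
              (PySem.List.sorted (PySem.List.dedup l) key) := by
          rw [PySem.List.sorted_eq_foldl_insertBy, List.foldl_append, ← PySem.List.sorted_eq_foldl_insertBy]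
          simp
        rw [hsd, ← ih, PySem.List.dedup_eq_ofList, h2, pv_ofList_append]
        have hd1' : List.foldl PySem.Set.add (PySem.Set.ofList P) Q = PySem.Set.ofList P ++ Δ := by
          simpa using hd1
        rw [hd1', pv_insertBy_append key x (PySem.Set.ofList P) Δ
          (fun y hy => h3 y ((PySem.Set.mem_ofList P y).mp hy))
          (fun q hq => by
            cases Δ with
            | nil => simp at hq
            | cons d t =>
                simp only [List.head?_cons, Option.some.injEq] at hq
                exact hq ▸ hQgt d (hd3 d (List.mem_cons_self ..)))]
        simp

-- ---- map commutes with the stable sort when the key factors through the map ----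

theorem pv_map_insertBy {α β : Type} (f : α → β) (key : β → Int) (x : α) (l : List α) :
    (PySem.List.insertBy (fun a b => decide (key (f a) < key (f b))) x l).map f =
      PySem.List.insertBy (fun a b => decide (key a < key b)) (f x) (l.map f) := by
  induction l with
  | nil => simp [PySem.List.insertBy]
  | cons y ys ih =>
      rw [PySem.List.insertBy]
      by_cases h : key (f x) < key (f y)
      · simp only [h, decide_true, if_true, List.map_cons]
        rw [PySem.List.insertBy]; simp [h]
      · simp only [h, decide_false, List.map_cons]
        rw [PySem.List.insertBy]; simp [h, ih]

theorem pv_map_sorted {α β : Type} (f : α → β) (key : β → Int) (l : List α) :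
    (PySem.List.sorted l (fun a => key (f a))).map f = PySem.List.sorted (l.map f) key := by
  rw [PySem.List.sorted_eq_foldl_insertBy, PySem.List.sorted_eq_foldl_insertBy]
  suffices h : ∀ (l : List α) (acc : List α),
      (List.foldl (fun acc x => PySem.List.insertBy (fun a b => decide (key (f a) < key (f b))) x acc) acc l).map f =
        List.foldl (fun acc y => PySem.List.insertBy (fun a b => decide (key a < key b)) y acc) (acc.map f) (l.map f) by
    simpa using h l []
  intro l
  induction l with
  | nil => intro acc; simp
  | cons x xs ih =>
      intro acc
      simp only [List.foldl_cons, List.map_cons, ih, pv_map_insertBy]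

-- ---- characterisation of the grouping fold over a dict ----

theorem pv_keys_modify_eq_add {κ ν : Type} [BEq κ] [LawfulBEq κ] (d : PySem.Dict κ ν)
    (k : κ) (d0 : ν) (f : ν → ν) :
    (d.modify k d0 f).keys = PySem.Set.add d.keys k := by
  rw [PySem.Dict.keys_modify]
  by_cases hc : d.contains k = true
  · rw [PySem.Dict.keys_insert_of_contains d _ hc,
      pv_add_of_mem ((PySem.Dict.contains_iff_mem_keys d k).mp hc)]
  · have hc' : d.contains k = false := by revert hc; cases d.contains k <;> simp
    rw [PySem.Dict.keys_insert_of_not_contains d _ hc',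
      pv_add_of_not_mem (fun h => by simp [(PySem.Dict.contains_iff_mem_keys d k).mpr h] at hc')]

theorem pv_keys_grouping_fold {β : Type} (l : List (String × β)) :
    ∀ (d : PySem.Dict String (List β)),
      (List.foldl (fun d p => d.modify p.1 [] (fun x => x ++ [p.2])) d l).keys =
        List.foldl PySem.Set.add d.keys (l.map Prod.fst) := by
  induction l with
  | nil => intro d; simp
  | cons p l ih =>
      intro d
      simp only [List.foldl_cons, List.map_cons, ih, pv_keys_modify_eq_add]

/-- Keys of the grouping fold from the empty dict: the distinct first-component values in
first-occurrence order. -/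
theorem pv_keys_grouping {β : Type} (l : List (String × β)) :
    (List.foldl (fun d p => d.modify p.1 [] (fun x => x ++ [p.2]))
        (PySem.Dict.empty : PySem.Dict String (List β)) l).keys =
      PySem.List.dedup (l.map Prod.fst) := by
  rw [pv_keys_grouping_fold, PySem.Dict.keys_empty, PySem.List.dedup_eq_ofList,
    PySem.Set.ofList_eq_foldl]

/-- Items of the grouping fold from the empty dict. -/
theorem pv_items_grouping {β : Type} (l : List (String × β)) :
    (List.foldl (fun d p => d.modify p.1 [] (fun x => x ++ [p.2]))
        (PySem.Dict.empty : PySem.Dict String (List β)) l).items =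
      (PySem.List.dedup (l.map Prod.fst)).map
        (fun k => (k, (l.filter (fun p => p.1 == k)).map (fun x => x.2))) := by
  have hnd : (List.foldl (fun d p => d.modify p.1 [] (fun x => x ++ [p.2]))
      (PySem.Dict.empty : PySem.Dict String (List β)) l).keys.Nodup := by
    have := PySem.Dict.nodup_keys_foldl_modify_key l Prod.fst ([] : List β)
      (fun _ p => fun x => x ++ [p.2]) PySem.Dict.empty PySem.Dict.nodup_keys_empty
    simpa using this
  rw [PySem.Dict.items_eq_map_keys _ hnd []]
  rw [pv_keys_grouping]
  refine List.map_congr_left ?_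
  intro k _
  rw [PySem.Dict.getD_foldl_modify_append l PySem.Dict.empty k, PySem.Dict.getD_empty]
  simp

-- ---- port A's loop body is the plain grouping step ----

theorem pv_insert_insert_self {κ ν : Type} [BEq κ] [LawfulBEq κ] (d : PySem.Dict κ ν)
    {k : κ} (v0 v : ν) (hc : d.contains k = false) :
    (d.insert k v0).insert k v = d.insert k v := by
  apply PySem.Dict.ext
  rw [PySem.Dict.items_insert_of_contains _ v (PySem.Dict.contains_insert_self _ _ _),
    PySem.Dict.items_insert_of_not_contains _ v0 hc,
    PySem.Dict.items_insert_of_not_contains _ v hc, List.map_append]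
  have hnone : ∀ p ∈ d.items, (p.1 == k) = false := by
    have := hc
    simp only [PySem.Dict.contains, List.any_eq_false] at this
    intro p hp
    have h := this p hp
    revert h; cases p.1 == k <;> simp
  rw [List.map_congr_left (fun p hp => by rw [hnone p hp]; rfl : ∀ p ∈ d.items, (if (p.1 == k) = true then (k, v) else p) = p)]
  simp

theorem pv_stepA_eq {κ ν : Type} [BEq κ] [LawfulBEq κ] (d : PySem.Dict κ ν)
    (k : κ) (f : ν → ν) (d0 : ν) :
    (if d.contains k then d else d.insert k d0).modify k d0 f = d.modify k d0 f := by
  by_cases hc : d.contains k = true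
  · rw [if_pos hc]
  · have hc' : d.contains k = false := by revert hc; cases d.contains k <;> simp
    rw [if_neg (by simp [hc']), show ∀ (e : PySem.Dict κ ν), e.modify k d0 f = e.insert k (f (e.getD k d0)) from fun _ => rfl,
      show ∀ (e : PySem.Dict κ ν), e.modify k d0 f = e.insert k (f (e.getD k d0)) from fun _ => rfl,
      PySem.Dict.getD_insert_self, PySem.Dict.getD_of_not_contains d d0 hc',
      pv_insert_insert_self d d0 _ hc']

-- ---- port A's output ----

theorem pv_foldl_insert_items {ν : Type} :
    ∀ (ks : List String) (g : String → ν) (d : PySem.Dict String ν), ks.Nodup →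
      (∀ k ∈ ks, d.contains k = false) →
      (List.foldl (fun o k => o.insert k (g k)) d ks).items = d.items ++ ks.map (fun k => (k, g k)) := by
  intro ks
  induction ks with
  | nil => intro g d _ _; simp
  | cons k ks ih =>
      intro g d hnd hfresh
      simp only [List.foldl_cons, List.map_cons]
      rw [ih g _ hnd.of_cons ?_, PySem.Dict.items_insert_of_not_contains _ _ (hfresh k (List.mem_cons_self ..))]
      · simp
      · intro k' hk'
        rw [PySem.Dict.contains_insert]
        have hne : k' ≠ k := fun h => (List.nodup_cons.mp hnd).1 (h ▸ hk')
        simp [hne, hfresh k' (List.mem_cons_of_mem _ hk')]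

theorem pv_groupA_items (servers : List (List (String × List (String × String)))) :
    group_servers_by_wave servers =
      (PySem.List.sorted (PySem.List.dedup ((servers.map (fun s => (pvWave s, s))).map Prod.fst)) pvKey).map
        (fun k => (k, ((servers.map (fun s => (pvWave s, s))).filter (fun p => p.1 == k)).map (fun x => x.2))) := by
  unfold group_servers_by_wave
  have hstep : (fun (d : PySem.Dict String (List (List (String × List (String × String))))) server =>
      let wave := pvWave server
      let d := if d.contains wave then d else d.insert wave []
      d.modify wave [] (fun l => l ++ [server])) =
      (fun d server => d.modify (pvWave server) [] (fun l => l ++ [server])) := by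
    funext d server
    exact pv_stepA_eq d (pvWave server) _ []
  rw [hstep]
  have hmap : servers.foldl (fun d server => d.modify (pvWave server) [] (fun l => l ++ [server]))
      PySem.Dict.empty =
      List.foldl (fun d p => d.modify p.1 [] (fun x => x ++ [p.2])) PySem.Dict.empty
        (servers.map (fun s => (pvWave s, s))) := by
    rw [List.foldl_map]
  rw [hmap]
  set D := List.foldl (fun d p => d.modify p.1 [] (fun x => x ++ [p.2])) PySem.Dict.empty
    (servers.map (fun s => (pvWave s, s))) with hD
  have hkeys : D.keys = PySem.List.dedup ((servers.map (fun s => (pvWave s, s))).map Prod.fst) :=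
    pv_keys_grouping _
  have hndk : D.keys.Nodup := by
    rw [hkeys, PySem.List.dedup_eq_ofList]; exact PySem.Set.nodup_ofList _
  have hnds : (PySem.List.sorted D.keys pvKey).Nodup :=
    ((PySem.List.sorted_perm D.keys pvKey false).nodup_iff).mpr hndk
  rw [pv_foldl_insert_items _ _ _ hnds (fun k _ => PySem.Dict.contains_empty k)]
  simp only [PySem.Dict.empty, List.nil_append]
  rw [hkeys]
  refine List.map_congr_left ?_
  intro k _
  rw [hD, PySem.Dict.getD_foldl_modify_append _ PySem.Dict.empty k, PySem.Dict.getD_empty]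
  simp

-- ---- port B's output ----

theorem pv_groupB_items (servers : List (List (String × List (String × String)))) :
    group_servers_by_wave_alt servers =
      (PySem.List.dedup ((PySem.List.sorted (servers.map (fun s => (pvWave s, s))) (fun p => pvKey p.1)).map Prod.fst)).map
        (fun k => (k, ((PySem.List.sorted (servers.map (fun s => (pvWave s, s))) (fun p => pvKey p.1)).filter (fun p => p.1 == k)).map (fun x => x.2))) := by
  unfold group_servers_by_wave_alt
  exact pv_items_grouping _

-- ===== VERDICT (by name: the statement is the Claim_ definition above) =====
theorem group_servers_by_wave_spec : Claim_equal_group_servers_by_wave := by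
  intro servers _
  unfold Spec_group_servers_by_wave
  rw [pv_groupA_items, pv_groupB_items]
  set dec := servers.map (fun s => (pvWave s, s)) with hdec
  have hkeys : PySem.List.dedup ((PySem.List.sorted dec (fun p => pvKey p.1)).map Prod.fst) =
      PySem.List.sorted (PySem.List.dedup (dec.map Prod.fst)) pvKey := by
    rw [pv_map_sorted Prod.fst pvKey dec, pv_dedup_sorted pvKey]
  rw [hkeys]
  refine List.map_congr_left ?_
  intro k _
  have hfilter : (PySem.List.sorted dec (fun p => pvKey p.1)).filter (fun p => p.1 == k) =
      dec.filter (fun p => p.1 == k) := by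
    refine pv_sorted_filter_of_class (fun p => pvKey p.1) (fun p => p.1 == k) (pvKey k) ?_ dec
    intro z hz
    have hzk : z.1 = k := by simpa using hz
    show pvKey z.1 = pvKey k
    rw [hzk]
  rw [hfilter]
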